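-- pv_equiv track=rewrite | github.com/sybeom528/code_kata | programmers/L0_기초입문/입문/085_치킨_쿠폰.py | solution
-- ===== SOURCE A (Python) =====
-- def solution(chicken):
--     answer = 0
--     coupon = chicken
--
--     while coupon >= 10:
--         chicken = coupon // 10
--         coupon = coupon % 10 + chicken
--         answer += chicken
--
--     return answer
-- ===== SOURCE B (Python) =====
-- def solution(chicken):
--     # closed form: each trade of 10 coupons yields 1 chicken (itself worth a coupon),
--     # so total free chickens = (chicken - 1) // 9, clamped at 0.
--     return max(chicken - 1, 0) // 9
-- ===== Notes on version B (the rewrite author's own statement) =====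
-- stated objective: faster
-- what changed: Replaced the coupon-trading simulation loop with the closed form max(chicken-1,0)//9.
import Mathlib
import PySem

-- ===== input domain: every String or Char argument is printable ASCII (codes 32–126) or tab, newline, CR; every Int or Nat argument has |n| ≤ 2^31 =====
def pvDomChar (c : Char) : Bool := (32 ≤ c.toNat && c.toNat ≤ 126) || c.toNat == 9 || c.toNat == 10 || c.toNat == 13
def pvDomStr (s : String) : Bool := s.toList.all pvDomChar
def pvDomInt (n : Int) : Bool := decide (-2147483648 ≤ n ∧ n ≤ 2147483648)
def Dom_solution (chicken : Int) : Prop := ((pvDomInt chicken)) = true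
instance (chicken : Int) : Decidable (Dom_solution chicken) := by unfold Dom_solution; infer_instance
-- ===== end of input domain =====

-- ===== PORT A =====
-- B replaces A's trade-simulation loop with a closed form; a timing run measures the speed claim.
-- loop: while coupon >= 10: chicken = coupon // 10; coupon = coupon % 10 + chicken; answer += chicken
def solutionLoop (answer coupon : Int) : Int :=
  if h : coupon ≥ 10 then
    solutionLoop (answer + PySem.Int.floordiv coupon 10)
      (PySem.Int.mod coupon 10 + PySem.Int.floordiv coupon 10)
  else answer
termination_by coupon.toNat
decreasing_by
  have h10 : (0:Int) < 10 := by norm_num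
  rw [PySem.Int.mod_eq_emod_of_pos h10, PySem.Int.floordiv_eq_ediv_of_pos h10]
  omega

def solution (chicken : Int) : Int := solutionLoop 0 chicken

-- ===== PORT B =====
def solution_alt (chicken : Int) : Int := PySem.Int.floordiv (max (chicken - 1) 0) 9
-- ===== PRECONDITION & SPEC =====
def Spec_solution (chicken : Int) (out : Int) : Prop := out = solution_alt chicken
instance (chicken : Int) (out : Int) : Decidable (Spec_solution chicken out) := by unfold Spec_solution; infer_instance

-- ===== CLAIM (what is proved, stated in full; the proofs are below) =====
def Claim_equal_solution : Prop := ∀ (chicken : Int), Dom_solution chicken → Spec_solution chicken (solution chicken)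

-- ===== LEMMAS AND PROOFS =====

-- ===== VERDICT (by name: the statement is the Claim_ definition above) =====
lemma solutionLoop_closed (answer coupon : Int) :
    solutionLoop answer coupon = answer + max (coupon - 1) 0 / 9 := by
  induction answer, coupon using solutionLoop.induct with
  | case1 a c h ih =>
    rw [solutionLoop]
    simp only [h, dite_true]
    rw [ih]
    have h10 : (0:Int) < 10 := by norm_num
    rw [PySem.Int.mod_eq_emod_of_pos h10, PySem.Int.floordiv_eq_ediv_of_pos h10]
    omega
  | case2 a c h =>
    rw [solutionLoop]
    simp only [h, dite_false]
    omega

theorem solution_spec : Claim_equal_solution := by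
  intro chicken _
  unfold Spec_solution solution solution_alt
  rw [solutionLoop_closed, PySem.Int.floordiv_eq_ediv_of_pos (by norm_num : (0:Int) < 9)]
  omega
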